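-- pv_equiv track=rewrite | github.com/CipherKit22/sate-cha | backend/simple_app.py | simple_similarity_search
-- ===== SOURCE A (Python) =====
-- def simple_similarity_search(query, knowledge_items):
--     """Simple keyword-based similarity search"""
--     query_words = set(query.lower().split())
--     results = []
--
--     for item in knowledge_items:
--         content_words = set(item['content'].lower().split())
--         title_words = set(item['title'].lower().split())
--
--         # Calculate simple overlap score
--         content_overlap = len(query_words.intersection(content_words))
--         title_overlap = len(query_words.intersection(title_words)) * 2  # Weight title matches more
--
--         total_score = content_overlap + title_overlap
--         if total_score > 0:
--             results.append((item, total_score))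
--
--     # Sort by score descending
--     results.sort(key=lambda x: x[1], reverse=True)
--     return results[:3]  # Return top 3 matches
-- ===== SOURCE B (Python) =====
-- def simple_similarity_search(query, knowledge_items):
--     """Single pass: score each item and keep only the best three in a small
--     descending-ordered buffer (bounded insertion), instead of collecting all
--     matches, fully sorting them and slicing."""
--     query_words = set(query.lower().split())
--
--     def score(item):
--         content_hits = len(query_words.intersection(item['content'].lower().split()))
--         title_hits = len(query_words.intersection(item['title'].lower().split()))
--         return content_hits + 2 * title_hits
--
--     top = []  # at most 3 pairs, scores descending, earlier items first on ties
--     for item in knowledge_items: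
--         s = score(item)
--         if s > 0:
--             i = 0
--             while i < len(top) and top[i][1] >= s:
--                 i += 1
--             top.insert(i, (item, s))
--             del top[3:]
--     return top
-- ===== Notes on version B (the rewrite author's own statement) =====
-- stated objective: alternative
-- what changed: B replaces A's collect-all-matches / full stable reverse sort / slice-[:3] with a single pass that keeps only the best three candidates in a small descending buffer via bounded insertion (scoring via a helper that intersects with the raw word list).
import Mathlib
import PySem

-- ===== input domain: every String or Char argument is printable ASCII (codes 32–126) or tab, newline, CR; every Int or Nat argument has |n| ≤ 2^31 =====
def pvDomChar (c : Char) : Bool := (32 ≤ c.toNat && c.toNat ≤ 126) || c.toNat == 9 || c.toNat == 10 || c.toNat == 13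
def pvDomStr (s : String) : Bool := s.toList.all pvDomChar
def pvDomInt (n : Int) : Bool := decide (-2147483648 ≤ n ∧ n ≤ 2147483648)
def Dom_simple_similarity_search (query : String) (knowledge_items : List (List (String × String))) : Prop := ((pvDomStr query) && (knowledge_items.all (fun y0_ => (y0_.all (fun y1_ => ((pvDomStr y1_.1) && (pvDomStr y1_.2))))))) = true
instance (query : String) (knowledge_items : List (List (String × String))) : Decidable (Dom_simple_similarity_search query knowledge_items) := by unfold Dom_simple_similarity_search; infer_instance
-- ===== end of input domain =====

-- B replaces A's collect-all / full-sort / slice with a single pass keeping only the best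
-- three matches in a bounded descending buffer (objective: alternative algorithm, same results).

-- ===== PORT A =====
-- item['content'] / item['title'] raise KeyError when missing; Pre_ excludes that, so the
-- total form .getD "" is only ever read on items where the key is present.
def simple_similarity_search (query : String) (knowledge_items : List (List (String × String))) : List ((List (String × String)) × Int) :=
  let query_words := PySem.Set.ofList (PySem.Str.split₀ (PySem.Str.lower query))
  let results := knowledge_items.foldl (fun results item =>
    let content_words := PySem.Set.ofList (PySem.Str.split₀ (PySem.Str.lower ((PySem.Dict.get? ⟨item⟩ "content").getD "")))
    let title_words := PySem.Set.ofList (PySem.Str.split₀ (PySem.Str.lower ((PySem.Dict.get? ⟨item⟩ "title").getD "")))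
    let content_overlap : Int := PySem.Set.len (PySem.Set.inter query_words content_words)
    let title_overlap : Int := PySem.Set.len (PySem.Set.inter query_words title_words) * 2
    let total_score := content_overlap + title_overlap
    if total_score > 0 then results ++ [(item, total_score)] else results) []
  -- results.sort(key=lambda x: x[1], reverse=True); return results[:3]
  (PySem.List.sorted results (fun x => x.2) true).take 3

-- ===== PORT B =====
-- B's score(item) helper (query_words.intersection(list) intersects with a raw word list)
def pvScoreB (query_words : PySem.Set String) (item : List (String × String)) : Int :=
  let content_hits := PySem.Set.len (PySem.Set.inter query_words (PySem.Str.split₀ (PySem.Str.lower ((PySem.Dict.get? ⟨item⟩ "content").getD ""))))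
  let title_hits := PySem.Set.len (PySem.Set.inter query_words (PySem.Str.split₀ (PySem.Str.lower ((PySem.Dict.get? ⟨item⟩ "title").getD ""))))
  content_hits + 2 * title_hits

-- B's while-loop insertion (insert after every kept pair with score ≥ s) is exactly
-- insertBy "before the first strictly smaller score"; del top[3:] is take 3.
def simple_similarity_search_alt (query : String) (knowledge_items : List (List (String × String))) : List ((List (String × String)) × Int) :=
  let query_words := PySem.Set.ofList (PySem.Str.split₀ (PySem.Str.lower query))
  knowledge_items.foldl (fun top item =>
    let s := pvScoreB query_words item
    if s > 0 then
      (PySem.List.insertBy (fun a b => decide (b.2 < a.2)) (item, s) top).take 3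
    else top) []

-- ===== PRECONDITION & SPEC =====
-- Pre_ excludes exactly the inputs where A raises KeyError: an item missing key 'content' or 'title'.
def Pre_simple_similarity_search (query : String) (knowledge_items : List (List (String × String))) : Prop :=
  ∀ item ∈ knowledge_items, (PySem.Dict.get? ⟨item⟩ "content").isSome ∧ (PySem.Dict.get? ⟨item⟩ "title").isSome
instance (query : String) (knowledge_items : List (List (String × String))) : Decidable (Pre_simple_similarity_search query knowledge_items) := by unfold Pre_simple_similarity_search; infer_instance

def pvWitness_simple_similarity_search : String × (List (List (String × String))) :=
  ("hello world", [[("content", "hello there"), ("title", "world news")], [("content", "x"), ("title", "y")]])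

def Spec_simple_similarity_search (query : String) (knowledge_items : List (List (String × String))) (out : List ((List (String × String)) × Int)) : Prop := out = simple_similarity_search_alt query knowledge_items
instance (query : String) (knowledge_items : List (List (String × String))) (out : List ((List (String × String)) × Int)) : Decidable (Spec_simple_similarity_search query knowledge_items out) := by unfold Spec_simple_similarity_search; infer_instance

-- ===== CLAIM (what is proved, stated in full; the proofs are below) =====
def Claim_equal_simple_similarity_search : Prop := ∀ (query : String) (knowledge_items : List (List (String × String))), Dom_simple_similarity_search query knowledge_items → Pre_simple_similarity_search query knowledge_items → Spec_simple_similarity_search query knowledge_items (simple_similarity_search query knowledge_items)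

-- ===== LEMMAS AND PROOFS =====

-- A's per-item score (intersection of two Sets) equals B's score (intersection with the raw word list).
theorem pvScoreB_eq (qw : PySem.Set String) (item : List (String × String)) :
    pvScoreB qw item =
      PySem.Set.len (PySem.Set.inter qw (PySem.Set.ofList (PySem.Str.split₀ (PySem.Str.lower ((PySem.Dict.get? ⟨item⟩ "content").getD ""))))) +
      PySem.Set.len (PySem.Set.inter qw (PySem.Set.ofList (PySem.Str.split₀ (PySem.Str.lower ((PySem.Dict.get? ⟨item⟩ "title").getD ""))))) * 2 := by
  simp [pvScoreB, PySem.Set.inter, PySem.Set.contains]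
  ring

-- Truncating to k elements commutes with insertion: only the first k slots matter.
theorem take_insertBy {α : Type} (before : α → α → Bool) (x : α) :
    ∀ (l : List α) (k : Nat),
      (PySem.List.insertBy before x l).take k = (PySem.List.insertBy before x (l.take k)).take k := by
  intro l
  induction l with
  | nil => intro k; simp [PySem.List.insertBy]
  | cons y ys ih =>
    intro k
    cases k with
    | zero => simp [PySem.List.insertBy]
    | succ k =>
      by_cases h : before x y
      · simp only [PySem.List.insertBy, h, List.take_succ_cons, if_pos]
        cases k with
        | zero => rfl
        | succ j => simp [List.take_take]
      · simp only [PySem.List.insertBy, h, List.take_succ_cons, if_neg, Bool.false_eq_true,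
          not_false_iff]
        rw [ih k]

-- Taking 3 of a fold of guarded insertions = folding guarded truncated insertions (B's loop invariant).
theorem take_foldl_insertBy {α β : Type} (before : α → α → Bool) (p : β → Bool) (f : β → α) :
    ∀ (ys : List β) (acc : List α),
      (ys.foldl (fun acc x => if p x then PySem.List.insertBy before (f x) acc else acc) acc).take 3 =
      ys.foldl (fun top x => if p x then (PySem.List.insertBy before (f x) top).take 3 else top) (acc.take 3) := by
  intro ys
  induction ys with
  | nil => intro acc; rfl
  | cons q qs ih =>
    intro acc
    simp only [List.foldl_cons]
    by_cases h : p q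
    · simp only [h, if_pos]
      rw [ih, take_insertBy before (f q) acc 3]
    · simp only [h, Bool.false_eq_true, if_neg, not_false_iff]
      exact ih acc

-- The core of the claim: top-3 of the reverse-sorted filtered score list equals
-- B's single pass with truncated insertions (generic in the score function).
theorem top3_sorted_eq_fold (score : List (String × String) → Int) (items : List (List (String × String))) :
    (PySem.List.sorted
        (items.foldl (fun results item => if score item > 0 then results ++ [(item, score item)] else results) [])
        (fun x => x.2) true).take 3
    = items.foldl (fun top item =>
        if score item > 0 then
          (PySem.List.insertBy (fun a b => decide (b.2 < a.2)) (item, score item) top).take 3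
        else top) [] := by
  rw [PySem.List.sorted_rev_eq_foldl_insertBy]
  have h1 : (fun (results : List ((List (String × String)) × Int)) item =>
        if score item > 0 then results ++ [(item, score item)] else results)
      = fun results item =>
        if (fun it => decide (score it > 0)) item = true
        then results ++ [(fun it => (it, score it)) item] else results := by
    funext r i; simp
  rw [h1, PySem.List.foldl_append_if, List.nil_append, List.foldl_map, List.foldl_filter,
    take_foldl_insertBy (fun a b => decide (b.2 < a.2)) (fun it => decide (score it > 0))
      (fun it => (it, score it))]
  simp only [List.take_nil]
  congr 1
  funext top item
  by_cases h : score item > 0 <;> simp [h]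

-- ===== VERDICT (by name: the statement is the Claim_ definition above) =====
theorem simple_similarity_search_spec : Claim_equal_simple_similarity_search := by
  intro query knowledge_items _ _
  unfold Spec_simple_similarity_search simple_similarity_search simple_similarity_search_alt
  simp only [pvScoreB_eq]
  exact top3_sorted_eq_fold _ knowledge_items
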